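-- pv_equiv track=rewrite | github.com/chiishie/CodePath-work | Week2/unit3advanced.py | arrange_guest_arrival_order
-- ===== SOURCE A (Python) =====
-- def arrange_guest_arrival_order(arrival_pattern):
--     n = len(arrival_pattern)
--     guest_order = []
--     stack = []
--
--     for i in range(n + 1):
--         stack.append(str(i + 1))
--         if i == n or arrival_pattern[i] == 'I':
--             while stack:
--                 guest_order.append(stack.pop())
--
--     return ''.join(guest_order)
-- ===== SOURCE B (Python) =====
-- def arrange_guest_arrival_order(arrival_pattern):
--     n = len(arrival_pattern)
--     nums = [str(i + 1) for i in range(n + 1)]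
--     start = 0
--     for i in range(n + 1):
--         if i == n or arrival_pattern[i] == 'I':
--             nums[start:i + 1] = nums[start:i + 1][::-1]
--             start = i + 1
--     return ''.join(nums)
-- ===== Notes on version B (the rewrite author's own statement) =====
-- stated objective: alternative
-- what changed: Replaces the push/pop stack that emits elements one at a time with a pre-built list of all n+1 labels and in-place reversal of each maximal decreasing segment, then a single join.
import Mathlib
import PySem

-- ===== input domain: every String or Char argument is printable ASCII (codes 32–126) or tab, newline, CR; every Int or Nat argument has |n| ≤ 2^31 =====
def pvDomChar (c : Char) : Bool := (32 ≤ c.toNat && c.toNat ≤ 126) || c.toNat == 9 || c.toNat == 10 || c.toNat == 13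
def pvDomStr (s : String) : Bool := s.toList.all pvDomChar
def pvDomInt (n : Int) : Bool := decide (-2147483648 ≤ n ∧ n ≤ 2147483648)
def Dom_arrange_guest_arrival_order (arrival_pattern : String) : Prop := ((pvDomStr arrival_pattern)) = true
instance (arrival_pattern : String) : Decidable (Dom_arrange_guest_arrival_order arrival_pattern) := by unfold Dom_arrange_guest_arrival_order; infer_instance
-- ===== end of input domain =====

-- B replaces A's push/pop stack with a pre-built label list and per-segment slice reversal (alternative decomposition, same cost).

-- ===== PORT A =====
-- loop body of A: push str(i+1); on 'I' or last index, pop the whole stack onto guest_order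
-- (s[i]? is exact here: the index is a loop counter 0 ≤ i < len, and at i = n the disjunction short-circuits as in Python)
def pvStepA (s : List Char) (n : Nat) (acc : List String × List String) (i : Nat) : List String × List String :=
  let stack := acc.2 ++ [PySem.Int.toStr ((i : Int) + 1)]
  if i = n ∨ s[i]? = some 'I' then (acc.1 ++ stack.reverse, ([] : List String))
  else (acc.1, stack)

def arrange_guest_arrival_order (arrival_pattern : String) : String :=
  PySem.Str.join ""
    (((List.range (arrival_pattern.toList.length + 1)).foldl
        (pvStepA arrival_pattern.toList arrival_pattern.toList.length) ([], [])).1)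

-- ===== PORT B =====
-- loop body of B: on 'I' or last index, reverse the slice nums[start:i+1] in place and set start := i+1
def pvStepB (s : List Char) (n : Nat) (acc : List String × Nat) (i : Nat) : List String × Nat :=
  if i = n ∨ s[i]? = some 'I' then
    (acc.1.take acc.2 ++ ((acc.1.drop acc.2).take (i + 1 - acc.2)).reverse ++ acc.1.drop (i + 1), i + 1)
  else acc

def arrange_guest_arrival_order_alt (arrival_pattern : String) : String :=
  PySem.Str.join ""
    (((List.range (arrival_pattern.toList.length + 1)).foldl
        (pvStepB arrival_pattern.toList arrival_pattern.toList.length)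
        ((List.range (arrival_pattern.toList.length + 1)).map
          (fun (i : Nat) => PySem.Int.toStr ((i : Int) + 1)), 0)).1)

-- ===== PRECONDITION & SPEC =====
def Spec_arrange_guest_arrival_order (arrival_pattern : String) (out : String) : Prop := out = arrange_guest_arrival_order_alt arrival_pattern
instance (arrival_pattern : String) (out : String) : Decidable (Spec_arrange_guest_arrival_order arrival_pattern out) := by unfold Spec_arrange_guest_arrival_order; infer_instance

-- ===== CLAIM (what is proved, stated in full; the proofs are below) =====
def Claim_equal_arrange_guest_arrival_order : Prop := ∀ (arrival_pattern : String), Dom_arrange_guest_arrival_order arrival_pattern → Spec_arrange_guest_arrival_order arrival_pattern (arrange_guest_arrival_order arrival_pattern)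

-- ===== LEMMAS AND PROOFS =====

-- invariant relating A's (guest_order, stack) to B's (nums, start) after the first i iterations
def pvInv (nums0 : List String) (i : Nat) (A : List String × List String) (B : List String × Nat) : Prop :=
  B.2 ≤ i ∧ A.1.length = B.2 ∧ A.2 = (nums0.drop B.2).take (i - B.2) ∧ B.1 = A.1 ++ nums0.drop B.2

theorem pv_step_inv (s : List Char) (n : Nat) (nums0 : List String)
    (h0 : nums0 = (List.range (n + 1)).map (fun (i : Nat) => PySem.Int.toStr ((i : Int) + 1)))
    (i : Nat) (hi : i < n + 1) (A : List String × List String) (B : List String × Nat)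
    (h : pvInv nums0 i A B) : pvInv nums0 (i + 1) (pvStepA s n A i) (pvStepB s n B i) := by
  obtain ⟨hle, hlen, hstk, hnums⟩ := h
  have hnlen : nums0.length = n + 1 := by simp [h0]
  have hget : nums0[i]? = some (PySem.Int.toStr ((i : Int) + 1)) := by
    subst h0; simp [hi]
  have hstk' : A.2 ++ [PySem.Int.toStr ((i : Int) + 1)] = (nums0.drop B.2).take (i + 1 - B.2) := by
    have h1 : (nums0.drop B.2)[i - B.2]? = some (PySem.Int.toStr ((i : Int) + 1)) := by
      rw [List.getElem?_drop, Nat.add_sub_cancel' hle, hget]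
    have h2 : i + 1 - B.2 = (i - B.2) + 1 := by omega
    rw [h2, List.take_add_one, h1, hstk]; rfl
  unfold pvStepA pvStepB
  by_cases hc : i = n ∨ s[i]? = some 'I'
  · simp only [hc, if_pos, pvInv]
    have htake : B.1.take B.2 = A.1 := by rw [hnums]; exact List.take_left' hlen
    have hdropB : B.1.drop B.2 = nums0.drop B.2 := by rw [hnums]; exact List.drop_left' hlen
    have hdrop1 : B.1.drop (i + 1) = nums0.drop (i + 1) := by
      have : B.1.drop (i + 1) = (B.1.drop B.2).drop (i + 1 - B.2) := by
        rw [List.drop_drop]; congr 1; omega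
      rw [this, hdropB, List.drop_drop]; congr 1; omega
    have hstklen : (A.2 ++ [PySem.Int.toStr ((i : Int) + 1)]).length = i + 1 - B.2 := by
      rw [hstk']
      rw [List.length_take, List.length_drop, hnlen]
      omega
    refine ⟨by omega, ?_, by simp, ?_⟩
    · simp only [List.length_append, List.length_reverse, hlen, hstklen]
      omega
    · simp only [htake, hdropB, hstk', hdrop1]
  · simp only [hc, if_neg, pvInv, not_false_iff]
    refine ⟨by omega, hlen, ?_, hnums⟩
    simpa using hstk' 

theorem pv_fold_inv (s : List Char) (n : Nat) (nums0 : List String)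
    (h0 : nums0 = (List.range (n + 1)).map (fun (i : Nat) => PySem.Int.toStr ((i : Int) + 1)))
    (m i : Nat) (hm : i + m ≤ n + 1) (A : List String × List String) (B : List String × Nat)
    (h : pvInv nums0 i A B) :
    pvInv nums0 (i + m) ((List.range' i m).foldl (pvStepA s n) A) ((List.range' i m).foldl (pvStepB s n) B) := by
  induction m generalizing i A B with
  | zero => simpa using h
  | succ m ih =>
      rw [List.range'_succ]
      simp only [List.foldl_cons]
      have := ih (i + 1) (by omega) _ _ (pv_step_inv s n nums0 h0 i (by omega) A B h)
      simpa [Nat.add_assoc, Nat.add_comm 1 m] using this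

-- ===== VERDICT (by name: the statement is the Claim_ definition above) =====
theorem arrange_guest_arrival_order_spec : Claim_equal_arrange_guest_arrival_order := by
  intro ap _
  unfold Spec_arrange_guest_arrival_order arrange_guest_arrival_order arrange_guest_arrival_order_alt
  set s := ap.toList with hs
  set n := s.length with hn
  set nums0 := (List.range (n + 1)).map (fun (i : Nat) => PySem.Int.toStr ((i : Int) + 1)) with h0
  -- split off the last iteration (index n)
  have hsplit : List.range (n + 1) = List.range' 0 n ++ [n] := by
    rw [List.range_eq_range', List.range'_concat]; simp
  rw [hsplit]
  simp only [List.foldl_append, List.foldl_cons, List.foldl_nil]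
  have hinv0 : pvInv nums0 0 (([], []) : List String × List String) ((nums0, 0) : List String × Nat) := by
    simp [pvInv]
  have hinvn := pv_fold_inv s n nums0 h0 n 0 (by omega) _ _ hinv0
  have hfin := pv_step_inv s n nums0 h0 n (by omega) _ _ (by simpa using hinvn)
  obtain ⟨h1, h2, h3, h4⟩ := hfin
  have hstart : (pvStepB s n ((List.range' 0 n).foldl (pvStepB s n) (nums0, 0)) n).2 = n + 1 := by
    simp [pvStepB]
  have hlen : nums0.length = n + 1 := by simp [h0]
  have hdrop : nums0.drop ((pvStepB s n ((List.range' 0 n).foldl (pvStepB s n) (nums0, 0)) n).2) = [] := by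
    rw [hstart, ← hlen, List.drop_length]
  rw [h4, hdrop, List.append_nil]
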